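-- pv_equiv track=rewrite | github.com/r07922120/ML2018FALL | hw2/function.py | wrong
-- ===== SOURCE A (Python) =====
-- def wrong(arr,feature):
-- 	for i in range(len(arr)):
-- 		if(feature[i]==0 and arr[i]<=0):
-- 			return 1
-- 		elif(feature[i]==1 and (arr[i]<1 or arr[i]>2)):
-- 			return 1
-- 		elif(feature[i]==2 and (arr[i]<1 or arr[i]>4)):
-- 			return 1
-- 		elif(feature[i]==3 and (arr[i]<1 or arr[i]>3)):
-- 			return 1
-- 		elif(feature[i] in [4,11,12,13,14,15,16,17,18,19,20,21,22] and arr[i]<0):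
-- 			return 1
-- 	return 0
-- ===== SOURCE B (Python) =====
-- # Column-oriented re-implementation: one pass per rule; for each feature code collect
-- # its values and compare only the column's min and max against the valid interval.
-- RULES = [(0, 1, None), (1, 1, 2), (2, 1, 4), (3, 1, 3)] + \
--         [(c, 0, None) for c in (4, 11, 12, 13, 14, 15, 16, 17, 18, 19, 20, 21, 22)]
--
-- def wrong(arr, feature):
--     for code, lo, hi in RULES:
--         vals = [x for x, f in zip(arr, feature) if f == code]
--         if vals and (min(vals) < lo or (hi is not None and max(vals) > hi)):
--             return 1
--     return 0
-- ===== Notes on version B (the rewrite author's own statement) =====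
-- stated objective: alternative
-- what changed: Replaced A's single index loop with its chained elif dispatch and first-violation early return by a column-oriented algorithm: for each rule (feature code, valid interval) B collects that code's values from zip(arr, feature) and tests only the column's min and max against the interval; correct because the 0/1 result only depends on whether any violating pair exists.
import Mathlib
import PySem

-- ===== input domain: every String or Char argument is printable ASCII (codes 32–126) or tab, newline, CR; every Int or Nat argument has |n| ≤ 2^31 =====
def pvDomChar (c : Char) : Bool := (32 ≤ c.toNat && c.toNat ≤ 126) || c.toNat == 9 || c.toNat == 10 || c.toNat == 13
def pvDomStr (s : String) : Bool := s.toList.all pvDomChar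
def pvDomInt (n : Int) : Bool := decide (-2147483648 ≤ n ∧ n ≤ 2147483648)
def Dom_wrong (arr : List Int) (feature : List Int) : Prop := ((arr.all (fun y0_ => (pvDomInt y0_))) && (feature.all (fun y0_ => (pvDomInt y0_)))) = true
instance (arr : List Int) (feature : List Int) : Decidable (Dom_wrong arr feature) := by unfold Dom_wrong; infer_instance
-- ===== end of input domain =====

-- B replaces A's index loop with its chained elif dispatch by a column-oriented check:
-- for each rule (feature code, valid interval) it collects that code's values and compares
-- only their min and max against the interval (objective: alternative; same O(n) cost class).

-- ===== PORT A =====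
-- the loop 'for i in range(len(arr))'; pyGetD is total — Pre_wrong keeps every index in range
def wrongLoopA (arr : List Int) (feature : List Int) : List Int → Int
  | [] => 0
  | i :: rest =>
    let f := PySem.List.pyGetD feature i 0
    let a := PySem.List.pyGetD arr i 0
    if f = 0 ∧ a ≤ 0 then 1
    else if f = 1 ∧ (a < 1 ∨ a > 2) then 1
    else if f = 2 ∧ (a < 1 ∨ a > 4) then 1
    else if f = 3 ∧ (a < 1 ∨ a > 3) then 1
    else if f ∈ ([4,11,12,13,14,15,16,17,18,19,20,21,22] : List Int) ∧ a < 0 then 1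
    else wrongLoopA arr feature rest

def wrong (arr : List Int) (feature : List Int) : Int :=
  wrongLoopA arr feature (PySem.List.pyRange 0 (PySem.List.len arr) 1)

-- ===== PORT B =====
-- RULES: (feature code, lower bound, optional upper bound); 'hi is None' = 'none'
def pvRules : List (Int × Int × Option Int) :=
  [(0, 1, none), (1, 1, some 2), (2, 1, some 4), (3, 1, some 3),
   (4, 0, none), (11, 0, none), (12, 0, none), (13, 0, none), (14, 0, none),
   (15, 0, none), (16, 0, none), (17, 0, none), (18, 0, none), (19, 0, none),
   (20, 0, none), (21, 0, none), (22, 0, none)]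

-- 'for code, lo, hi in RULES: vals = [x for x, f in zip(arr, feature) if f == code]; …'
-- min(vals)/max(vals) ported as PySem.List.min?/max?; 'vals and …' short-circuits: the
-- catch-all branch (empty vals) falls through to the next rule; 'hi is not None and
-- max(vals) > hi' is Option.any.
def wrongLoopB (pairs : List (Int × Int)) : List (Int × Int × Option Int) → Int
  | [] => 0
  | (code, lo, hi) :: rest =>
    let vals := (pairs.filter (fun p => p.2 == code)).map Prod.fst
    match PySem.List.min? vals (fun x => x), PySem.List.max? vals (fun x => x) with
    | some mn, some mx =>
        if decide (mn < lo) || hi.any (fun h => decide (mx > h)) then 1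
        else wrongLoopB pairs rest
    | _, _ => wrongLoopB pairs rest

def wrong_alt (arr : List Int) (feature : List Int) : Int :=
  wrongLoopB (arr.zip feature) pvRules

-- ===== PRECONDITION & SPEC =====
-- the violation predicate of A's elif chain, per (value, feature) pair (used by Pre_ and the proofs)
def badA (x f : Int) : Bool :=
  decide ((f = 0 ∧ x ≤ 0) ∨ (f = 1 ∧ (x < 1 ∨ x > 2)) ∨ (f = 2 ∧ (x < 1 ∨ x > 4)) ∨
    (f = 3 ∧ (x < 1 ∨ x > 3)) ∨
    (f ∈ ([4,11,12,13,14,15,16,17,18,19,20,21,22] : List Int) ∧ x < 0))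

-- Pre_ excludes exactly the inputs on which A raises IndexError: arr strictly longer than
-- feature with no violating pair in the zipped prefix (otherwise A returns before feature[i]
-- goes out of range).
def Pre_wrong (arr : List Int) (feature : List Int) : Prop :=
  arr.length ≤ feature.length ∨ ((arr.zip feature).any (fun p => badA p.1 p.2) = true)
instance (arr : List Int) (feature : List Int) : Decidable (Pre_wrong arr feature) := by unfold Pre_wrong; infer_instance
def pvWitness_wrong : List Int × List Int := ([1, -2, 3], [0, 11, 2])

def Spec_wrong (arr : List Int) (feature : List Int) (out : Int) : Prop := out = wrong_alt arr feature
instance (arr : List Int) (feature : List Int) (out : Int) : Decidable (Spec_wrong arr feature out) := by unfold Spec_wrong; infer_instance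

-- ===== CLAIM (what is proved, stated in full; the proofs are below) =====
def Claim_equal_wrong : Prop := ∀ (arr : List Int) (feature : List Int), Dom_wrong arr feature → Pre_wrong arr feature → Spec_wrong arr feature (wrong arr feature)

-- ===== LEMMAS AND PROOFS =====

-- rule r flags pair p
def badFor (r : Int × Int × Option Int) (p : Int × Int) : Bool :=
  p.2 == r.1 && (decide (p.1 < r.2.1) || r.2.2.any (fun h => decide (p.1 > h)))

-- one step of A's elif chain
theorem stepA (f x : Int) (c : Int) :
    (if f = 0 ∧ x ≤ 0 then (1:Int)
     else if f = 1 ∧ (x < 1 ∨ x > 2) then 1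
     else if f = 2 ∧ (x < 1 ∨ x > 4) then 1
     else if f = 3 ∧ (x < 1 ∨ x > 3) then 1
     else if f ∈ ([4,11,12,13,14,15,16,17,18,19,20,21,22] : List Int) ∧ x < 0 then 1
     else c)
    = if badA x f then 1 else c := by
  by_cases h0 : f = 0
  · subst h0; simp [badA]
  by_cases h1 : f = 1
  · subst h1; simp [badA]
  by_cases h2 : f = 2
  · subst h2; simp [badA]
  by_cases h3 : f = 3
  · subst h3; simp [badA]
  by_cases h4 : f = 4
  · subst h4; simp [badA]
  by_cases h11 : f = 11
  · subst h11; simp [badA]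
  by_cases h12 : f = 12
  · subst h12; simp [badA]
  by_cases h13 : f = 13
  · subst h13; simp [badA]
  by_cases h14 : f = 14
  · subst h14; simp [badA]
  by_cases h15 : f = 15
  · subst h15; simp [badA]
  by_cases h16 : f = 16
  · subst h16; simp [badA]
  by_cases h17 : f = 17
  · subst h17; simp [badA]
  by_cases h18 : f = 18
  · subst h18; simp [badA]
  by_cases h19 : f = 19
  · subst h19; simp [badA]
  by_cases h20 : f = 20
  · subst h20; simp [badA]
  by_cases h21 : f = 21
  · subst h21; simp [badA]
  by_cases h22 : f = 22
  · subst h22; simp [badA]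
  simp [badA, h0, h1, h2, h3, h4, h11, h12, h13, h14, h15, h16, h17, h18, h19, h20, h21, h22]

-- 0/1 selector absorbs a false disjunct
theorem ite_false_or (b x : Bool) (hb : b = false) :
    (if x = true then (1:Int) else 0) = if (b || x) = true then 1 else 0 := by
  subst hb; simp

-- A's indexed loop from position pa.length equals "any violating pair" over the suffixes
theorem loopA_eq (pa a pf g : List Int) (hp : pa.length = pf.length)
    (hlen : a.length ≤ g.length) :
    wrongLoopA (pa ++ a) (pf ++ g)
        (PySem.List.pyRange pa.length (pa.length + a.length) 1)
    = if (a.zip g).any (fun p => badA p.1 p.2) then 1 else 0 := by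
  induction a generalizing g pa pf with
  | nil => simp [wrongLoopA, PySem.List.pyRange]
  | cons x a' ih =>
    cases g with
    | nil => simp at hlen
    | cons y g' =>
      rw [PySem.List.pyRange_one_cons (by simp)]
      have hpa : PySem.List.pyGetD (pa ++ x :: a') ((pa.length : Int)) 0 = x := by
        simp [PySem.List.pyGetD_natCast, List.getD]
      have hpf : PySem.List.pyGetD (pf ++ y :: g') ((pa.length : Int)) 0 = y := by
        simp [PySem.List.pyGetD_natCast, hp, List.getD]
      simp only [wrongLoopA, hpa, hpf]
      rw [stepA]
      have hcont : wrongLoopA (pa ++ x :: a') (pf ++ y :: g')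
            (PySem.List.pyRange ((pa.length : Int) + 1)
              ((pa.length : Int) + ((x :: a').length : Int)) 1)
          = if (a'.zip g').any (fun p => badA p.1 p.2) then 1 else 0 := by
        have key := ih (pa ++ [x]) (pf ++ [y]) g' (by simp [hp]) (by simpa using hlen)
        have hlen1 : (((pa ++ [x]).length : Int)) = (pa.length : Int) + 1 := by simp
        rw [show pa ++ x :: a' = (pa ++ [x]) ++ a' by simp,
            show pf ++ y :: g' = (pf ++ [y]) ++ g' by simp,
            show PySem.List.pyRange ((pa.length : Int) + 1)
                  ((pa.length : Int) + ((x :: a').length : Int)) 1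
                = PySem.List.pyRange (((pa ++ [x]).length : Int))
                  (((pa ++ [x]).length : Int) + (a'.length : Int)) 1 by
              rw [hlen1]; congr 1; push_cast [List.length_cons]; ring]
        exact key
      rw [hcont]
      cases hb : badA x y with
      | true => simp [hb]
      | false =>
        simp only [List.zip_cons_cons, List.any_cons]
        exact ite_false_or _ _ hb

-- A's indexed loop returns 1 as soon as the suffix contains a violating pair,
-- even if arr is longer than feature
theorem loopA_one (pa a pf g : List Int) (hp : pa.length = pf.length)
    (hv : (a.zip g).any (fun p => badA p.1 p.2) = true) :
    wrongLoopA (pa ++ a) (pf ++ g)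
        (PySem.List.pyRange pa.length (pa.length + a.length) 1) = 1 := by
  induction a generalizing g pa pf with
  | nil => simp at hv
  | cons x a' ih =>
    cases g with
    | nil => simp at hv
    | cons y g' =>
      rw [PySem.List.pyRange_one_cons (by simp)]
      have hpa : PySem.List.pyGetD (pa ++ x :: a') ((pa.length : Int)) 0 = x := by
        simp [PySem.List.pyGetD_natCast, List.getD]
      have hpf : PySem.List.pyGetD (pf ++ y :: g') ((pa.length : Int)) 0 = y := by
        simp [PySem.List.pyGetD_natCast, hp, List.getD]
      simp only [wrongLoopA, hpa, hpf]
      rw [stepA]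
      cases hb : badA x y with
      | true => simp
      | false =>
        rw [if_neg (by decide : ¬ (false = true))]
        have hv' : (a'.zip g').any (fun p => badA p.1 p.2) = true := by
          simp only [List.zip_cons_cons, List.any_cons, hb, Bool.false_or] at hv
          exact hv
        have key := ih (pa ++ [x]) (pf ++ [y]) g' (by simp [hp]) hv'
        have hlen1 : (((pa ++ [x]).length : Int)) = (pa.length : Int) + 1 := by simp
        rw [show pa ++ x :: a' = (pa ++ [x]) ++ a' by simp,
            show pf ++ y :: g' = (pf ++ [y]) ++ g' by simp,
            show PySem.List.pyRange ((pa.length : Int) + 1)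
                  ((pa.length : Int) + ((x :: a').length : Int)) 1
                = PySem.List.pyRange (((pa ++ [x]).length : Int))
                  (((pa ++ [x]).length : Int) + (a'.length : Int)) 1 by
              rw [hlen1]; congr 1; push_cast [List.length_cons]; ring]
        exact key

-- the minimum is below lo iff some element is
theorem anyD_min (vals : List Int) (lo mn : Int)
    (hmn : PySem.List.min? vals (fun x => x) = some mn) :
    decide (mn < lo) = vals.any (fun x => decide (x < lo)) := by
  have hmem := PySem.List.min?_mem hmn
  have hmin := PySem.List.min?_isMin hmn
  rw [Bool.eq_iff_iff]
  simp only [List.any_eq_true, decide_eq_true_eq]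
  constructor
  · intro h; exact ⟨mn, hmem, h⟩
  · rintro ⟨z, hz, hzl⟩; exact lt_of_le_of_lt (by simpa using hmin z hz) hzl

-- the maximum is above h iff some element is
theorem anyD_max (vals : List Int) (h mx : Int)
    (hmx : PySem.List.max? vals (fun x => x) = some mx) :
    decide (mx > h) = vals.any (fun x => decide (x > h)) := by
  have hmem := PySem.List.max?_mem hmx
  have hmax := PySem.List.max?_isMax hmx
  rw [Bool.eq_iff_iff]
  simp only [List.any_eq_true, decide_eq_true_eq]
  constructor
  · intro hgt; exact ⟨mx, hmem, hgt⟩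
  · rintro ⟨z, hz, hzg⟩; exact lt_of_lt_of_le hzg (by simpa using hmax z hz)

-- any distributes over || (existence of a witness for either disjunct)
theorem any_or_split (l : List Int) (p q : Int → Bool) :
    l.any (fun x => p x || q x) = (l.any p || l.any q) := by
  rw [Bool.eq_iff_iff]
  simp only [List.any_eq_true, Bool.or_eq_true]
  constructor
  · rintro ⟨x, hx, h | h⟩
    · exact Or.inl ⟨x, hx, h⟩
    · exact Or.inr ⟨x, hx, h⟩
  · rintro (⟨x, hx, h⟩ | ⟨x, hx, h⟩)
    · exact ⟨x, hx, Or.inl h⟩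
    · exact ⟨x, hx, Or.inr h⟩

-- one rule step of B: the min/max test equals "some pair violates this rule"
theorem stepB (pairs : List (Int × Int)) (code lo : Int) (hi : Option Int) (c : Int) :
    (let vals := (pairs.filter (fun p => p.2 == code)).map Prod.fst
     match PySem.List.min? vals (fun x => x), PySem.List.max? vals (fun x => x) with
     | some mn, some mx =>
         if decide (mn < lo) || hi.any (fun h => decide (mx > h)) then 1
         else c
     | _, _ => c)
    = if pairs.any (badFor (code, lo, hi)) then 1 else c := by
  have hval : pairs.any (badFor (code, lo, hi))
      = ((pairs.filter (fun p => p.2 == code)).map Prod.fst).any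
          (fun x => decide (x < lo) || hi.any (fun h => decide (x > h))) := by
    simp only [List.any_map, List.any_filter, Function.comp]
    rfl
  cases hmn : PySem.List.min? ((pairs.filter (fun p => p.2 == code)).map Prod.fst)
      (fun x => x) with
  | none =>
    have hnil := (PySem.List.min?_eq_none_iff _ _).1 hmn
    rw [hval]
    simp only [hnil]
    simp [PySem.List.min?, PySem.List.max?]
  | some mn =>
    cases hmx : PySem.List.max? ((pairs.filter (fun p => p.2 == code)).map Prod.fst)
        (fun x => x) with
    | none =>
      have hnil := (PySem.List.max?_eq_none_iff _ _).1 hmx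
      rw [hnil] at hmn; simp [PySem.List.min?] at hmn
    | some mx =>
      rw [hval]
      simp only [hmn, hmx]
      cases hi with
      | none =>
        simp only [Option.any_none, Bool.or_false]
        simp only [anyD_min _ lo mn hmn]
      | some h =>
        simp only [Option.any_some]
        simp only [any_or_split, anyD_min _ lo mn hmn, anyD_max _ h mx hmx]

-- B's rule loop equals "any rule flags any pair"
theorem loopB_eq (pairs : List (Int × Int)) (rules : List (Int × Int × Option Int)) :
    wrongLoopB pairs rules
    = if rules.any (fun r => pairs.any (badFor r)) then 1 else 0 := by
  induction rules with
  | nil => simp [wrongLoopB]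
  | cons r rest ih =>
    obtain ⟨code, lo, hi⟩ := r
    show (let vals := (pairs.filter (fun p => p.2 == code)).map Prod.fst
          match PySem.List.min? vals (fun x => x), PySem.List.max? vals (fun x => x) with
          | some mn, some mx =>
              if decide (mn < lo) || hi.any (fun h => decide (mx > h)) then 1
              else wrongLoopB pairs rest
          | _, _ => wrongLoopB pairs rest) = _
    rw [stepB pairs code lo hi (wrongLoopB pairs rest), ih]
    cases h : pairs.any (badFor (code, lo, hi)) with
    | true => simp [List.any_cons, h]
    | false =>
      simp only [List.any_cons]
      exact ite_false_or _ _ h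

-- pointwise bridge: A's elif predicate on a pair = "some rule flags the pair"
theorem badA_eq (p : Int × Int) :
    badA p.1 p.2 = pvRules.any (fun r => badFor r p) := by
  obtain ⟨x, f⟩ := p
  by_cases h0 : f = 0
  · subst h0; simp [badA, badFor, pvRules]; omega
  by_cases h1 : f = 1
  · subst h1; simp [badA, badFor, pvRules]
  by_cases h2 : f = 2
  · subst h2; simp [badA, badFor, pvRules]
  by_cases h3 : f = 3
  · subst h3; simp [badA, badFor, pvRules]
  by_cases h4 : f = 4
  · subst h4; simp [badA, badFor, pvRules]
  by_cases h11 : f = 11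
  · subst h11; simp [badA, badFor, pvRules]
  by_cases h12 : f = 12
  · subst h12; simp [badA, badFor, pvRules]
  by_cases h13 : f = 13
  · subst h13; simp [badA, badFor, pvRules]
  by_cases h14 : f = 14
  · subst h14; simp [badA, badFor, pvRules]
  by_cases h15 : f = 15
  · subst h15; simp [badA, badFor, pvRules]
  by_cases h16 : f = 16
  · subst h16; simp [badA, badFor, pvRules]
  by_cases h17 : f = 17
  · subst h17; simp [badA, badFor, pvRules]
  by_cases h18 : f = 18
  · subst h18; simp [badA, badFor, pvRules]
  by_cases h19 : f = 19
  · subst h19; simp [badA, badFor, pvRules]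
  by_cases h20 : f = 20
  · subst h20; simp [badA, badFor, pvRules]
  by_cases h21 : f = 21
  · subst h21; simp [badA, badFor, pvRules]
  by_cases h22 : f = 22
  · subst h22; simp [badA, badFor, pvRules]
  simp [badA, badFor, pvRules, h0, h1, h2, h3, h4, h11, h12, h13, h14, h15, h16,
        h17, h18, h19, h20, h21, h22]

-- swap the two existential scans (the 0/1 output is order-independent)
theorem any_swap (pairs : List (Int × Int)) (rules : List (Int × Int × Option Int)) :
    rules.any (fun r => pairs.any (badFor r))
    = pairs.any (fun p => rules.any (fun r => badFor r p)) := by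
  rw [Bool.eq_iff_iff]
  simp only [List.any_eq_true]
  tauto

-- ===== VERDICT (by name: the statement is the Claim_ definition above) =====
theorem wrong_spec : Claim_equal_wrong := by
  intro arr feature _ hpre
  unfold Spec_wrong wrong wrong_alt
  have hfun : (fun p : Int × Int => badA p.1 p.2)
      = fun p => pvRules.any (fun r => badFor r p) := funext badA_eq
  rcases hpre with hlen | hv
  · have hA := loopA_eq [] arr [] feature rfl hlen
    simp only [List.nil_append, List.length_nil, Nat.cast_zero, zero_add] at hA
    simp only [PySem.List.len_eq]
    rw [hA, loopB_eq, any_swap, hfun]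
  · have hB : wrongLoopB (arr.zip feature) pvRules = 1 := by
      rw [loopB_eq, any_swap, ← hfun, hv]
      simp
    have hA1 := loopA_one [] arr [] feature rfl hv
    simp only [List.nil_append, List.length_nil, Nat.cast_zero, zero_add] at hA1
    simp only [PySem.List.len_eq]
    rw [hA1, hB]
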